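-- pv_equiv track=rewrite | github.com/gaushwravetu/Coding-Problems | code chef/chefina and swap.py | SequenceChecker
-- ===== SOURCE A (Python) =====
-- def SequenceChecker(ad, bd, abd, mymin):
--     atob = []
--     btoa = []
--     cost = 0
--     for i in abd:
--         if abd[i]%2!=0:
--             return -1
--         elif(i in ad or i in bd):
--             if ad[i]==None:
--                 ad[i]=0
--             if bd[i]==None:
--                 bd[i]=0
--             if ad[i]==bd[i]:
--                 continue
--             elif ad[i]>bd[i]:
--                 for x in range((ad[i]-bd[i])//2):
--                     atob.append(i)
--             else:
--                 for x in range((bd[i]-ad[i])//2):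
--                     btoa.append(i)
--     lenatob = len(atob)
--     lenbtoa = len(btoa)
--     if lenatob==0 and lenbtoa==0:
--         return cost
--     if lenatob!=lenbtoa:
--         return -1
--     atob.sort()
--     btoa.sort(reverse=True)
--     for i in range(lenatob):
--         cost+= min(2*mymin, min(atob[i],btoa[i]))
--     return cost
-- ===== SOURCE B (Python) =====
-- def SequenceChecker(ad, bd, abd, mymin):
--     # Count-based rewrite: instead of materialising one list entry per pair of
--     # surplus copies, keep one (value -> pair-count) dict per direction, sort the
--     # few distinct values, and merge the two run-length lists with two pointers.
--     atob = {}
--     btoa = {}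
--     na = 0
--     nb = 0
--     for i in abd:
--         if abd[i] % 2 != 0:
--             return -1
--         if i in ad or i in bd:
--             a = ad[i]
--             b = bd[i]
--             c = abs(a - b) // 2
--             if c:
--                 if a > b:
--                     atob[i] = c
--                     na += c
--                 else:
--                     btoa[i] = c
--                     nb += c
--     if na == 0 and nb == 0:
--         return 0
--     if na != nb:
--         return -1
--     ra = sorted(atob.items(), key=lambda p: p[0])          # ascending values
--     rb = sorted(btoa.items(), key=lambda p: p[0], reverse=True)  # descending values
--     # walk both run lists front-to-back (kept reversed so the current run is at the end)
--     ra.reverse()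
--     rb.reverse()
--     cap = 2 * mymin
--     cost = 0
--     while ra and rb:
--         va, ca = ra[-1]
--         vb, cb = rb[-1]
--         t = min(ca, cb)
--         cost += t * min(cap, va, vb)
--         if ca == t:
--             ra.pop()
--         else:
--             ra[-1] = (va, ca - t)
--         if cb == t:
--             rb.pop()
--         else:
--             rb[-1] = (vb, cb - t)
--     return cost
-- ===== Notes on version B (the rewrite author's own statement) =====
-- stated objective: alternative
-- what changed: B keeps one (value -> pair-count) dict per direction instead of materialising one list entry per surplus pair, sorts only the distinct values, and replaces A's full sort plus index loop by a two-pointer run-length merge that charges min(2*mymin, min(va, vb)) per block of paired copies.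
import Mathlib
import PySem

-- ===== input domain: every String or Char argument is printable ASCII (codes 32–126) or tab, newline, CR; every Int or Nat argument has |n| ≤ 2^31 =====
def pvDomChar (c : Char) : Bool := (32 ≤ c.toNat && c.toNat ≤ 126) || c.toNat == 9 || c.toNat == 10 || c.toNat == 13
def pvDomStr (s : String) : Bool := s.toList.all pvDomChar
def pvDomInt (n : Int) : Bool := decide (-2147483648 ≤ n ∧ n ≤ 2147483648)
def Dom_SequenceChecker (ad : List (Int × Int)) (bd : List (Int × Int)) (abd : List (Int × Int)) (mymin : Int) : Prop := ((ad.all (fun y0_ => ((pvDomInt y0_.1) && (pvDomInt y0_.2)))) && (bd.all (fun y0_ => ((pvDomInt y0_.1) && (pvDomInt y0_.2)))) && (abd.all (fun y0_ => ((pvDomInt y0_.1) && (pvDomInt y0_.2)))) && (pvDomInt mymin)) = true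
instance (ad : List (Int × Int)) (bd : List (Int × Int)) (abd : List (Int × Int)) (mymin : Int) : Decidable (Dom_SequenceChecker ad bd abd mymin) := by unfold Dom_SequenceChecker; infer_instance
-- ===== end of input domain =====

-- B replaces A's expansion of each surplus value into (diff/2) list copies + full sort + index loop
-- by per-value pair-counts, a sort of the distinct values only, and a two-pointer run-length merge.
-- Equivalence is about return values only (A's in-place ad[i]=0 / bd[i]=0 writes are dead code for int values).

-- ===== PORT A =====
-- the for-loop over the keys of abd; an early `return -1` is `none`.
-- `ad[i]` / `bd[i]` would raise KeyError when the key is missing; those inputs are outside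
-- Pre_SequenceChecker, so the total `getD _ _ 0` agrees with Python on every admitted input.
-- (`if ad[i]==None: ad[i]=0` can never fire on int values and is dropped as dead code.)
def pvALoop (adD bdD abdD : PySem.Dict Int Int) :
    List Int → List Int → List Int → Option (List Int × List Int)
  | [], atob, btoa => some (atob, btoa)
  | i :: ks, atob, btoa =>
    if PySem.Int.mod (abdD.getD i 0) 2 ≠ 0 then none
    else if adD.contains i || bdD.contains i then
      if adD.getD i 0 = bdD.getD i 0 then pvALoop adD bdD abdD ks atob btoa
      else if adD.getD i 0 > bdD.getD i 0 then
        pvALoop adD bdD abdD ks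
          ((PySem.List.pyRange 0 (PySem.Int.floordiv (adD.getD i 0 - bdD.getD i 0) 2) 1).foldl
            (fun l _ => l ++ [i]) atob) btoa
      else
        pvALoop adD bdD abdD ks atob
          ((PySem.List.pyRange 0 (PySem.Int.floordiv (bdD.getD i 0 - adD.getD i 0) 2) 1).foldl
            (fun l _ => l ++ [i]) btoa)
    else pvALoop adD bdD abdD ks atob btoa

def SequenceChecker (ad : List (Int × Int)) (bd : List (Int × Int)) (abd : List (Int × Int)) (mymin : Int) : Int :=
  let adD := PySem.Dict.ofList ad
  let bdD := PySem.Dict.ofList bd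
  let abdD := PySem.Dict.ofList abd
  match pvALoop adD bdD abdD abdD.keys [] [] with
  | none => -1
  | some (atob, btoa) =>
    let lenatob : Int := atob.length
    let lenbtoa : Int := btoa.length
    if lenatob = 0 ∧ lenbtoa = 0 then 0
    else if lenatob ≠ lenbtoa then -1
    else
      let atobS := PySem.List.sorted atob (fun x => x) false
      let btoaS := PySem.List.sorted btoa (fun x => x) true
      (PySem.List.pyRange 0 lenatob 1).foldl
        (fun cost k => cost + min (2 * mymin) (min (PySem.List.pyGetD atobS k 0) (PySem.List.pyGetD btoaS k 0))) 0

-- ===== PORT B =====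
-- Source B's counting loop over the keys of abd (same early `return -1` as `none`;
-- the KeyError of ad[i] / bd[i] is likewise outside Pre_SequenceChecker).
def pvBLoop (adD bdD abdD : PySem.Dict Int Int) :
    List Int → PySem.Dict Int Int → PySem.Dict Int Int → Int → Int →
    Option (PySem.Dict Int Int × PySem.Dict Int Int × Int × Int)
  | [], da, db, na, nb => some (da, db, na, nb)
  | i :: ks, da, db, na, nb =>
    if PySem.Int.mod (abdD.getD i 0) 2 ≠ 0 then none
    else if adD.contains i || bdD.contains i then
      let a := adD.getD i 0
      let b := bdD.getD i 0
      let c := PySem.Int.floordiv |a - b| 2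
      if c ≠ 0 then
        if a > b then pvBLoop adD bdD abdD ks (da.insert i c) db (na + c) nb
        else pvBLoop adD bdD abdD ks da (db.insert i c) (na) (nb + c)
      else pvBLoop adD bdD abdD ks da db na nb
    else pvBLoop adD bdD abdD ks da db na nb

-- Source B's while loop: it reverses both run lists and pops from the END, i.e. it walks the
-- original lists front to back; ported as head recursion on the unreversed lists (exact).
def pvMerge (cap : Int) : List (Int × Int) → List (Int × Int) → Int → Int
  | [], _, cost => cost
  | _ :: _, [], cost => cost
  | (va, ca) :: ra, (vb, cb) :: rb, cost =>
    let t := min ca cb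
    pvMerge cap (if ca = t then ra else (va, ca - t) :: ra)
                (if cb = t then rb else (vb, cb - t) :: rb)
                (cost + t * min cap (min va vb))
  termination_by ra rb _ => ra.length + rb.length
  decreasing_by
    rcases min_choice ca cb with h | h <;> split_ifs with h1 h2 <;>
      simp only [List.length_cons] <;> omega

def SequenceChecker_alt (ad : List (Int × Int)) (bd : List (Int × Int)) (abd : List (Int × Int)) (mymin : Int) : Int :=
  let adD := PySem.Dict.ofList ad
  let bdD := PySem.Dict.ofList bd
  let abdD := PySem.Dict.ofList abd
  match pvBLoop adD bdD abdD abdD.keys PySem.Dict.empty PySem.Dict.empty 0 0 with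
  | none => -1
  | some (da, db, na, nb) =>
    if na = 0 ∧ nb = 0 then 0
    else if na ≠ nb then -1
    else
      let ra := PySem.List.sorted da.items (fun p => p.1) false
      let rb := PySem.List.sorted db.items (fun p => p.1) true
      pvMerge (2 * mymin) ra rb 0

-- ===== PRECONDITION & SPEC =====
-- Pre_ excludes exactly the inputs where Python A raises KeyError: a key of abd with an even
-- value that lies in exactly one of ad, bd and is not preceded (in abd's key order) by an
-- odd-valued key (A would have returned -1 at that earlier key).
def Pre_SequenceChecker (ad : List (Int × Int)) (bd : List (Int × Int)) (abd : List (Int × Int)) (mymin : Int) : Prop :=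
  ∀ k < ((PySem.Dict.ofList abd : PySem.Dict Int Int).items).length,
    (PySem.Int.mod (((PySem.Dict.ofList abd : PySem.Dict Int Int).items.getD k (0, 0)).2) 2 = 0 ∧
      ((PySem.Dict.ofList ad : PySem.Dict Int Int).contains
          (((PySem.Dict.ofList abd : PySem.Dict Int Int).items.getD k (0, 0)).1) = true ∨
        (PySem.Dict.ofList bd : PySem.Dict Int Int).contains
          (((PySem.Dict.ofList abd : PySem.Dict Int Int).items.getD k (0, 0)).1) = true) ∧
      ¬((PySem.Dict.ofList ad : PySem.Dict Int Int).contains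
          (((PySem.Dict.ofList abd : PySem.Dict Int Int).items.getD k (0, 0)).1) = true ∧
        (PySem.Dict.ofList bd : PySem.Dict Int Int).contains
          (((PySem.Dict.ofList abd : PySem.Dict Int Int).items.getD k (0, 0)).1) = true)) →
    ∃ j < k, PySem.Int.mod (((PySem.Dict.ofList abd : PySem.Dict Int Int).items.getD j (0, 0)).2) 2 ≠ 0
instance (ad : List (Int × Int)) (bd : List (Int × Int)) (abd : List (Int × Int)) (mymin : Int) : Decidable (Pre_SequenceChecker ad bd abd mymin) := by unfold Pre_SequenceChecker; infer_instance

def pvWitness_SequenceChecker : (List (Int × Int)) × (List (Int × Int)) × (List (Int × Int)) × Int :=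
  ([(1, 4)], [(1, 2)], [(1, 2)], 1)

def Spec_SequenceChecker (ad : List (Int × Int)) (bd : List (Int × Int)) (abd : List (Int × Int)) (mymin : Int) (out : Int) : Prop := out = SequenceChecker_alt ad bd abd mymin
instance (ad : List (Int × Int)) (bd : List (Int × Int)) (abd : List (Int × Int)) (mymin : Int) (out : Int) : Decidable (Spec_SequenceChecker ad bd abd mymin out) := by unfold Spec_SequenceChecker; infer_instance

-- ===== CLAIM (what is proved, stated in full; the proofs are below) =====
def Claim_equal_SequenceChecker : Prop := ∀ (ad : List (Int × Int)) (bd : List (Int × Int)) (abd : List (Int × Int)) (mymin : Int), Dom_SequenceChecker ad bd abd mymin → Pre_SequenceChecker ad bd abd mymin → Spec_SequenceChecker ad bd abd mymin (SequenceChecker ad bd abd mymin)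

-- ===== LEMMAS AND PROOFS =====

-- expansion of a run-length list (value, pair-count) back into the flat list A builds
def pvExpand (rs : List (Int × Int)) : List Int := rs.flatMap (fun p => List.replicate p.2.toNat p.1)

def pvPairSum (cap : Int) (xs ys : List Int) : Int :=
  ((xs.zip ys).map (fun p => min cap (min p.1 p.2))).sum

theorem pvExpand_cons (p : Int × Int) (rs : List (Int × Int)) :
    pvExpand (p :: rs) = List.replicate p.2.toNat p.1 ++ pvExpand rs := by
  simp [pvExpand]

theorem pvExpand_append (rs ss : List (Int × Int)) :
    pvExpand (rs ++ ss) = pvExpand rs ++ pvExpand ss := by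
  simp [pvExpand]

theorem pvExpand_length (rs : List (Int × Int)) (h : ∀ p ∈ rs, 0 ≤ p.2) :
    ((pvExpand rs).length : Int) = (rs.map (·.2)).sum := by
  induction rs with
  | nil => simp [pvExpand]
  | cons p rs ih =>
    have hp : 0 ≤ p.2 := h p (by simp)
    have := ih (fun q hq => h q (by simp [hq]))
    simp only [pvExpand_cons, List.length_append, List.length_replicate, List.map_cons, List.sum_cons]
    push_cast
    rw [this, Int.toNat_of_nonneg hp]

theorem pvExpand_perm {rs ss : List (Int × Int)} (h : rs.Perm ss) :
    (pvExpand rs).Perm (pvExpand ss) :=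
  List.Perm.flatMap h (fun _ _ => List.Perm.refl _)

-- sum of the appended copies loop
theorem pvFoldl_append_const (l : List Int) (i : Int) (acc : List Int) :
    l.foldl (fun l _ => l ++ [i]) acc = acc ++ List.replicate l.length i := by
  induction l generalizing acc with
  | nil => simp
  | cons x l ih =>
    rw [List.foldl_cons, ih, List.append_assoc, List.singleton_append, ← List.replicate_succ,
      List.length_cons]

theorem pvRange_append_const (c : Int) (i : Int) (acc : List Int) :
    (PySem.List.pyRange 0 c 1).foldl (fun l _ => l ++ [i]) acc = acc ++ List.replicate c.toNat i := by
  rw [pvFoldl_append_const, PySem.List.length_pyRange_one]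
  norm_num

-- the joint loop invariant: A's lists are the expansions of B's count dicts
theorem pvLoop_rel (adD bdD abdD : PySem.Dict Int Int) :
    ∀ (ks : List Int) (da db : PySem.Dict Int Int) (na nb : Int),
    ks.Nodup →
    (∀ i ∈ ks, da.contains i = false) → (∀ i ∈ ks, db.contains i = false) →
    da.keys.Nodup → db.keys.Nodup →
    (∀ p ∈ da.items, 0 < p.2) → (∀ p ∈ db.items, 0 < p.2) →
    na = (da.items.map (·.2)).sum → nb = (db.items.map (·.2)).sum →
    (pvALoop adD bdD abdD ks (pvExpand da.items) (pvExpand db.items) = none ∧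
      pvBLoop adD bdD abdD ks da db na nb = none) ∨
    (∃ da' db' na' nb',
      pvBLoop adD bdD abdD ks da db na nb = some (da', db', na', nb') ∧
      pvALoop adD bdD abdD ks (pvExpand da.items) (pvExpand db.items) =
        some (pvExpand da'.items, pvExpand db'.items) ∧
      da'.keys.Nodup ∧ db'.keys.Nodup ∧
      (∀ p ∈ da'.items, 0 < p.2) ∧ (∀ p ∈ db'.items, 0 < p.2) ∧
      na' = (da'.items.map (·.2)).sum ∧ nb' = (db'.items.map (·.2)).sum) := by
  intro ks
  induction ks with
  | nil =>
    intro da db na nb _ _ _ hka hkb hpa hpb hna hnb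
    exact Or.inr ⟨da, db, na, nb, rfl, rfl, hka, hkb, hpa, hpb, hna, hnb⟩
  | cons i ks ih =>
    intro da db na nb hnd hfa hfb hka hkb hpa hpb hna hnb
    have hndt : ks.Nodup := (List.nodup_cons.mp hnd).2
    have hni : i ∉ ks := (List.nodup_cons.mp hnd).1
    have hfa' : ∀ j ∈ ks, da.contains j = false := fun j hj => hfa j (by simp [hj])
    have hfb' : ∀ j ∈ ks, db.contains j = false := fun j hj => hfb j (by simp [hj])
    rw [pvALoop, pvBLoop]
    by_cases hodd : PySem.Int.mod (abdD.getD i 0) 2 ≠ 0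
    · rw [if_pos hodd, if_pos hodd]
      exact Or.inl ⟨rfl, rfl⟩
    · rw [if_neg hodd, if_neg hodd]
      by_cases hmem : (adD.contains i || bdD.contains i) = true
      · rw [if_pos hmem, if_pos hmem]
        dsimp only
        rcases lt_trichotomy (adD.getD i 0) (bdD.getD i 0) with hab | hab | hab
        · -- a < b : copies go to btoa / db
          rw [if_neg (ne_of_lt hab), if_neg (by omega), abs_of_neg (by omega : adD.getD i 0 - bdD.getD i 0 < 0), neg_sub]
          have hc0 : 0 ≤ PySem.Int.floordiv (bdD.getD i 0 - adD.getD i 0) 2 := by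
            rw [PySem.Int.floordiv_eq_ediv_of_pos (by norm_num)]
            exact Int.ediv_nonneg (by omega) (by norm_num)
          rw [pvRange_append_const]
          by_cases hc : PySem.Int.floordiv (bdD.getD i 0 - adD.getD i 0) 2 = 0
          · rw [if_neg (by simpa using hc), hc]
            simpa using ih da db na nb hndt hfa' hfb' hka hkb hpa hpb hna hnb
          · rw [if_pos (by simpa using hc), if_neg (by omega : ¬ bdD.getD i 0 < adD.getD i 0)]
            have hfresh : db.contains i = false := hfb i (by simp)
            have hit : (db.insert i (PySem.Int.floordiv (bdD.getD i 0 - adD.getD i 0) 2)).items =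
                db.items ++ [(i, PySem.Int.floordiv (bdD.getD i 0 - adD.getD i 0) 2)] :=
              PySem.Dict.items_insert_of_not_contains db _ hfresh
            have H := ih da (db.insert i (PySem.Int.floordiv (bdD.getD i 0 - adD.getD i 0) 2))
              na (nb + PySem.Int.floordiv (bdD.getD i 0 - adD.getD i 0) 2)
              hndt hfa'
              (fun j hj => by
                rw [PySem.Dict.contains_insert]
                have : (j == i) = false := by
                  simp only [beq_eq_false_iff_ne, ne_eq]
                  exact fun h => hni (h ▸ hj)
                rw [this, hfb' j hj]
                rfl)
              hka (PySem.Dict.nodup_keys_insert db i _ hkb)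
              hpa
              (fun p hp => by
                rw [hit] at hp
                rcases List.mem_append.mp hp with h2 | h2
                · exact hpb p h2
                · simp only [List.mem_singleton] at h2
                  subst h2
                  simp only
                  omega)
              hna
              (by rw [hit]; simp [hnb])
            rw [hit, pvExpand_append] at H
            simpa [pvExpand] using H
        · -- a = b : both skip
          rw [if_pos hab, if_neg (by simp [hab])]
          simpa using ih da db na nb hndt hfa' hfb' hka hkb hpa hpb hna hnb
        · -- a > b : copies go to atob / da
          rw [if_neg (ne_of_gt hab), if_pos (by omega), abs_of_pos (by omega : (0:Int) < adD.getD i 0 - bdD.getD i 0)]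
          have hc0 : 0 ≤ PySem.Int.floordiv (adD.getD i 0 - bdD.getD i 0) 2 := by
            rw [PySem.Int.floordiv_eq_ediv_of_pos (by norm_num)]
            exact Int.ediv_nonneg (by omega) (by norm_num)
          rw [pvRange_append_const]
          by_cases hc : PySem.Int.floordiv (adD.getD i 0 - bdD.getD i 0) 2 = 0
          · rw [if_neg (by simpa using hc), hc]
            simpa using ih da db na nb hndt hfa' hfb' hka hkb hpa hpb hna hnb
          · rw [if_pos (by simpa using hc), if_pos (by omega : bdD.getD i 0 < adD.getD i 0)]
            have hfresh : da.contains i = false := hfa i (by simp)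
            have hit : (da.insert i (PySem.Int.floordiv (adD.getD i 0 - bdD.getD i 0) 2)).items =
                da.items ++ [(i, PySem.Int.floordiv (adD.getD i 0 - bdD.getD i 0) 2)] :=
              PySem.Dict.items_insert_of_not_contains da _ hfresh
            have H := ih (da.insert i (PySem.Int.floordiv (adD.getD i 0 - bdD.getD i 0) 2)) db
              (na + PySem.Int.floordiv (adD.getD i 0 - bdD.getD i 0) 2) nb
              hndt
              (fun j hj => by
                rw [PySem.Dict.contains_insert]
                have : (j == i) = false := by
                  simp only [beq_eq_false_iff_ne, ne_eq]
                  exact fun h => hni (h ▸ hj)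
                rw [this, hfa' j hj]
                rfl)
              hfb'
              (PySem.Dict.nodup_keys_insert da i _ hka) hkb
              (fun p hp => by
                rw [hit] at hp
                rcases List.mem_append.mp hp with h2 | h2
                · exact hpa p h2
                · simp only [List.mem_singleton] at h2
                  subst h2
                  simp only
                  omega)
              hpb
              (by rw [hit]; simp [hna])
              hnb
            rw [hit, pvExpand_append] at H
            simpa [pvExpand] using H
      · rw [if_neg hmem, if_neg hmem]
        exact ih da db na nb hndt hfa' hfb' hka hkb hpa hpb hna hnb

-- Pairwise transport through expansion
theorem pvExpand_pairwise_le {rs : List (Int × Int)}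
    (h : rs.Pairwise (fun p q => p.1 ≤ q.1)) : (pvExpand rs).Pairwise (· ≤ ·) := by
  induction rs with
  | nil => simp [pvExpand]
  | cons p rs ih =>
    rw [pvExpand_cons]
    rcases List.pairwise_cons.mp h with ⟨hhead, htail⟩
    refine List.pairwise_append.mpr ⟨List.pairwise_replicate.mpr (Or.inr le_rfl), ih htail, ?_⟩
    intro x hx y hy
    rcases List.mem_flatMap.mp hy with ⟨q, hq, hyq⟩
    rw [List.eq_of_mem_replicate hx, List.eq_of_mem_replicate hyq]
    exact hhead q hq

theorem pvExpand_pairwise_ge {rs : List (Int × Int)}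
    (h : rs.Pairwise (fun p q => q.1 ≤ p.1)) : (pvExpand rs).Pairwise (fun a b => b ≤ a) := by
  induction rs with
  | nil => simp [pvExpand]
  | cons p rs ih =>
    rw [pvExpand_cons]
    rcases List.pairwise_cons.mp h with ⟨hhead, htail⟩
    refine List.pairwise_append.mpr ⟨List.pairwise_replicate.mpr (Or.inr le_rfl), ih htail, ?_⟩
    intro x hx y hy
    rcases List.mem_flatMap.mp hy with ⟨q, hq, hyq⟩
    rw [List.eq_of_mem_replicate hx, List.eq_of_mem_replicate hyq]
    exact hhead q hq

-- sorting the expansion = expanding the sorted run list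
theorem pvSorted_expand (rs : List (Int × Int)) :
    PySem.List.sorted (pvExpand rs) (fun x => x) false =
      pvExpand (PySem.List.sorted rs (fun p => p.1) false) := by
  exact PySem.List.sorted_id_eq_of_perm_of_pairwise _ _
    (pvExpand_perm (PySem.List.sorted_perm rs _ false))
    (pvExpand_pairwise_le (PySem.List.sorted_pairwise rs _))

theorem pvSortedRev_expand (rs : List (Int × Int)) :
    PySem.List.sorted (pvExpand rs) (fun x => x) true =
      pvExpand (PySem.List.sorted rs (fun p => p.1) true) := by
  exact ((PySem.List.sorted_perm _ _ true).trans
      (pvExpand_perm (PySem.List.sorted_perm rs _ true)).symm).eq_of_pairwise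
    (fun a b _ _ h1 h2 => le_antisymm h2 h1)
    (PySem.List.sorted_pairwise_rev _ _)
    (pvExpand_pairwise_ge (PySem.List.sorted_pairwise_rev rs _))

-- A's final index loop is the zip sum
theorem pvFinalLoop_eq (cap : Int) (xs ys : List Int) (h : xs.length = ys.length) :
    (PySem.List.pyRange 0 (xs.length : Int) 1).foldl
      (fun cost k => cost + min cap (min (PySem.List.pyGetD xs k 0) (PySem.List.pyGetD ys k 0))) 0 =
      pvPairSum cap xs ys := by
  rw [PySem.List.foldl_add, zero_add]
  unfold pvPairSum
  congr 1
  apply List.ext_getElem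
  · simp [PySem.List.length_pyRange_one, h]
  · intro k h1 h2
    have hk : k < xs.length := by
      simpa [PySem.List.length_pyRange_one] using h1
    have hky : k < ys.length := h ▸ hk
    simp only [List.getElem_map]
    rw [PySem.List.getElem_pyRange_one, zero_add, PySem.List.pyGetD_natCast,
      PySem.List.pyGetD_natCast, List.getD_eq_getElem _ _ hk, List.getD_eq_getElem _ _ hky,
      List.getElem_zip]

theorem pvPairSum_replicate_split (cap va vb : Int) (n : Nat) (X Y : List Int) :
    pvPairSum cap (List.replicate n va ++ X) (List.replicate n vb ++ Y) =
      (n : Int) * min cap (min va vb) + pvPairSum cap X Y := by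
  unfold pvPairSum
  rw [List.zip_append (by simp), List.map_append, List.sum_append, List.zip_replicate]
  simp [List.map_replicate, List.sum_replicate]

-- B's two-pointer merge computes the zip sum of the expansions
theorem pvMerge_eq (cap : Int) :
    ∀ (ra rb : List (Int × Int)) (cost : Int),
    (∀ p ∈ ra, 0 < p.2) → (∀ p ∈ rb, 0 < p.2) →
    (pvExpand ra).length = (pvExpand rb).length →
    pvMerge cap ra rb cost = cost + pvPairSum cap (pvExpand ra) (pvExpand rb) := by
  intro ra rb cost
  induction ra, rb, cost using pvMerge.induct cap with
  | case1 rb cost =>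
    intro _ _ _
    simp [pvMerge, pvPairSum, pvExpand]
  | case2 hd tl cost =>
    intro _ _ _
    simp [pvMerge, pvPairSum, pvExpand]
  | case3 va ca ra vb cb rb cost t ih =>
    intro hpa hpb hlen
    have hca : 0 < ca := hpa (va, ca) (by simp)
    have hcb : 0 < cb := hpb (vb, cb) (by simp)
    have hpa' : ∀ p ∈ ra, 0 < p.2 := fun p hp => hpa p (by simp [hp])
    have hpb' : ∀ p ∈ rb, 0 < p.2 := fun p hp => hpb p (by simp [hp])
    rw [pvExpand_cons, pvExpand_cons] at hlen
    simp only [List.length_append, List.length_replicate] at hlen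
    have htdef : t = min ca cb := rfl
    rcases le_total ca cb with hle | hle
    · have ht : min ca cb = ca := min_eq_left hle
      have htt : t = ca := by rw [htdef, ht]
      rw [htt] at ih
      simp only [dite_eq_ite, if_true] at ih
      have hexp : pvExpand (if cb = ca then rb else (vb, cb - ca) :: rb) =
          List.replicate (cb - ca).toNat vb ++ pvExpand rb := by
        by_cases h : cb = ca
        · simp [h, pvExpand]
        · rw [if_neg h, pvExpand_cons]
      have hpb'' : ∀ p ∈ (if cb = ca then rb else (vb, cb - ca) :: rb), 0 < p.2 := by
        by_cases h : cb = ca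
        · simpa [h] using hpb'
        · rw [if_neg h]
          intro p hp
          rcases List.mem_cons.mp hp with h2 | h2
          · subst h2; simp; omega
          · exact hpb' p h2
      have hlen' : (pvExpand ra).length =
          (pvExpand (if cb = ca then rb else (vb, cb - ca) :: rb)).length := by
        rw [hexp]; simp; omega
      rw [pvMerge]
      simp only [ht, if_true]
      rw [ih hpa' hpb'' hlen']
      have hsplit : cb.toNat = ca.toNat + (cb - ca).toNat := by omega
      rw [pvExpand_cons, pvExpand_cons, hsplit, List.replicate_add, List.append_assoc,
        pvPairSum_replicate_split, hexp, Int.toNat_of_nonneg (le_of_lt hca)]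
      ring
    · have ht : min ca cb = cb := min_eq_right hle
      have htt : t = cb := by rw [htdef, ht]
      rw [htt] at ih
      simp only [dite_eq_ite, if_true] at ih
      have hexp : pvExpand (if ca = cb then ra else (va, ca - cb) :: ra) =
          List.replicate (ca - cb).toNat va ++ pvExpand ra := by
        by_cases h : ca = cb
        · simp [h, pvExpand]
        · rw [if_neg h, pvExpand_cons]
      have hpa'' : ∀ p ∈ (if ca = cb then ra else (va, ca - cb) :: ra), 0 < p.2 := by
        by_cases h : ca = cb
        · simpa [h] using hpa'
        · rw [if_neg h]
          intro p hp
          rcases List.mem_cons.mp hp with h2 | h2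
          · subst h2; simp; omega
          · exact hpa' p h2
      have hlen' : (pvExpand (if ca = cb then ra else (va, ca - cb) :: ra)).length =
          (pvExpand rb).length := by
        rw [hexp]; simp; omega
      rw [pvMerge]
      simp only [ht, if_true]
      rw [ih hpa'' hpb' hlen']
      have hsplit : ca.toNat = cb.toNat + (ca - cb).toNat := by omega
      rw [pvExpand_cons, pvExpand_cons, hsplit, List.replicate_add, List.append_assoc,
        pvPairSum_replicate_split, hexp, Int.toNat_of_nonneg (le_of_lt hcb)]
      ring

-- ===== VERDICT (by name: the statement is the Claim_ definition above) =====
theorem SequenceChecker_spec : Claim_equal_SequenceChecker := by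
  unfold Claim_equal_SequenceChecker
  intro ad bd abd mymin _ _
  unfold Spec_SequenceChecker SequenceChecker SequenceChecker_alt
  dsimp only
  have h := pvLoop_rel (PySem.Dict.ofList ad) (PySem.Dict.ofList bd) (PySem.Dict.ofList abd)
    (PySem.Dict.ofList abd).keys PySem.Dict.empty PySem.Dict.empty 0 0
    (PySem.Dict.nodup_keys_ofList abd)
    (fun i _ => PySem.Dict.contains_empty i) (fun i _ => PySem.Dict.contains_empty i)
    (by rw [PySem.Dict.keys_empty]; exact List.nodup_nil)
    (by rw [PySem.Dict.keys_empty]; exact List.nodup_nil)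
    (fun p hp => absurd hp (List.not_mem_nil))
    (fun p hp => absurd hp (List.not_mem_nil))
    rfl rfl
  rw [show pvExpand (PySem.Dict.empty : PySem.Dict Int Int).items = ([] : List Int) from rfl] at h
  rcases h with ⟨hA, hB⟩ | ⟨da, db, na, nb, hB, hA, hka, hkb, hpa, hpb, hna, hnb⟩
  · rw [hA, hB]
  · rw [hA, hB]
    dsimp only
    have hlenA : (((pvExpand da.items).length : Int)) = na := by
      rw [pvExpand_length da.items (fun p hp => le_of_lt (hpa p hp)), hna]
    have hlenB : (((pvExpand db.items).length : Int)) = nb := by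
      rw [pvExpand_length db.items (fun p hp => le_of_lt (hpb p hp)), hnb]
    rw [hlenA, hlenB]
    split_ifs with h1 h2
    · rfl
    · rfl
    · -- main branch: equal positive totals
      rw [pvSorted_expand, pvSortedRev_expand]
      have hna' : ((pvExpand (PySem.List.sorted da.items (fun p => p.1) false)).length : Int) = na := by
        rw [List.Perm.length_eq (pvExpand_perm (PySem.List.sorted_perm da.items _ false)), hlenA]
      have hnb' : ((pvExpand (PySem.List.sorted db.items (fun p => p.1) true)).length : Int) = nb := by
        rw [List.Perm.length_eq (pvExpand_perm (PySem.List.sorted_perm db.items _ true)), hlenB]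
      have hnanb : na = nb := by omega
      have hlen : (pvExpand (PySem.List.sorted da.items (fun p => p.1) false)).length =
          (pvExpand (PySem.List.sorted db.items (fun p => p.1) true)).length := by omega
      rw [← hna', pvFinalLoop_eq _ _ _ hlen]
      rw [pvMerge_eq (2 * mymin) _ _ 0
        (fun p hp => hpa p ((PySem.List.mem_sorted _ _ _ _).mp hp))
        (fun p hp => hpb p ((PySem.List.mem_sorted _ _ _ _).mp hp))
        hlen, zero_add]
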